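-- pv_equiv track=rewrite | github.com/dmmiller/adventofcode | 2020/day14/solution.py | generate_addresses
-- ===== SOURCE A (Python) =====
-- from typing import Generator
--
-- def apply_memory_mask(mask : str, value : int) -> str:
--     bin_value = list('{0:036b}'.format(value))
--     for i in range(len(mask)):
--         if mask[i] == '1':
--             bin_value[i] = '1'
--         elif mask[i] == 'X':
--             bin_value[i] = 'X'
--     return ''.join(bin_value)
--
-- def generate_addresses(mask : str, address : int) -> Generator[int, None, None]:
--     def inner_generator(address : str) -> Generator[int, None, None]:
--         if 'X' not in address:
--             yield int(address, base=2)
--         else: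
--             for addr in inner_generator(address.replace("X", "0", 1)):
--                 yield addr
--             for addr in inner_generator(address.replace("X", "1", 1)):
--                 yield addr
--
--     address = apply_memory_mask(mask, address)
--     for addr in inner_generator(address):
--         yield addr
-- ===== SOURCE B (Python) =====
-- def generate_addresses(mask, address):
--     bits36 = '{0:036b}'.format(address)
--     masked = ''.join(m if m in '1X' else b for m, b in zip(mask, bits36)) + bits36[len(mask):]
--     k = masked.count('X')
--     for i in range(1 << k):
--         bits = iter(format(i, '0{}b'.format(k)))
--         yield int(''.join(next(bits) if c == 'X' else c for c in masked), 2)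
-- ===== Notes on version B (the rewrite author's own statement) =====
-- stated objective: idiomatic
-- what changed: A expands wildcards by recursively re-scanning and str.replace-ing the masked string one X at a time (rebuilding intermediate strings at every tree node); B computes the masked string once and flatly enumerates i in range(2**k), substituting the k bits of i into the X slots in a single pass per output.
import Mathlib
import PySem

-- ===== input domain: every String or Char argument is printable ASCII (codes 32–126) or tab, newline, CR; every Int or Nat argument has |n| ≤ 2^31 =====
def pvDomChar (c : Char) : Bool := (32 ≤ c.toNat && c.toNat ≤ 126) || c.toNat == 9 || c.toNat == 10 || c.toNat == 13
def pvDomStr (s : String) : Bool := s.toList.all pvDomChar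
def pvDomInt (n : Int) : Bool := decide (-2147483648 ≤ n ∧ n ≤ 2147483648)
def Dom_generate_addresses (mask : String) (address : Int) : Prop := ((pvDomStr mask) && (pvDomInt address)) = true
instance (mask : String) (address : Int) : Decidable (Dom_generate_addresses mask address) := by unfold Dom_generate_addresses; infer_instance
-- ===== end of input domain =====

-- B replaces A's recursive one-X-at-a-time string substitution by a single flat
-- enumeration of i in range(2^k) substituted into the k wildcard slots (objective:
-- idiomatic; a timing run measured B faster). Both are generators in Python;
-- the ports return the yielded list.

-- shared exact ports of Python built-ins used by both sources
-- '{0:b}'.format on a Nat: repeated divmod by 2, MSB first ('0' for 0); the first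
-- argument is structural fuel (n halves each step, so fuel n suffices)
def natToBinCore : Nat → Nat → List Char
  | _, 0 => []
  | 0, _ + 1 => []
  | f + 1, n + 1 => natToBinCore f ((n + 1) / 2) ++ [if (n + 1) % 2 = 1 then '1' else '0']

def natToBin (n : Nat) : List Char := if n = 0 then ['0'] else natToBinCore n n

-- zero-padding to width w (no padding if already longer), as in format '0<w>b'
def padLeft (w : Nat) (l : List Char) : List Char := List.replicate (w - l.length) '0' ++ l

-- '{0:036b}'.format(v): for negative v Python emits '-' then pads digits to total width 36
def pyFormat036b (v : Int) : List Char :=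
  if v < 0 then '-' :: padLeft 35 (natToBin v.natAbs) else padLeft 36 (natToBin v.natAbs)

-- int(s, base=2) on the strings both programs build: binary digits, optional leading '-'
def binNat (s : List Char) : Int := s.foldl (fun a c => 2 * a + (if c = '1' then 1 else 0)) 0

def intOfBin (s : List Char) : Int :=
  match s with
  | '-' :: t => -(binNat t)
  | _ => binNat s

-- ===== PORT A =====
def apply_memory_mask (mask : String) (value : Int) : List Char :=
  (List.range mask.toList.length).foldl
    (fun bv i =>
      if mask.toList.getD i ' ' = '1' then bv.set i '1'
      else if mask.toList.getD i ' ' = 'X' then bv.set i 'X'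
      else bv)
    (pyFormat036b value)

-- address.replace("X", "0"/"1", 1)
def replaceOnce (c : Char) : List Char → List Char
  | [] => []
  | x :: xs => if x = 'X' then c :: xs else x :: replaceOnce c xs

theorem count_replaceOnce_lt (c : Char) (hc : c ≠ 'X') :
    ∀ s : List Char, 'X' ∈ s → (replaceOnce c s).count 'X' < s.count 'X' := by
  intro s
  induction s with
  | nil => simp
  | cons x xs ih =>
    intro hs
    by_cases hx : x = 'X'
    · subst hx
      simp [replaceOnce, hc]
    · have hm : 'X' ∈ xs := by
        rcases List.mem_cons.mp hs with h | h
        · exact absurd h.symm hx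
        · exact h
      have := ih hm
      simp [replaceOnce, hx, List.count_cons]
      omega

def innerGen (s : List Char) : List Int :=
  if h : 'X' ∈ s then
    innerGen (replaceOnce '0' s) ++ innerGen (replaceOnce '1' s)
  else [intOfBin s]
  termination_by s.count 'X'
  decreasing_by
  · exact count_replaceOnce_lt '0' (by decide) s h
  · exact count_replaceOnce_lt '1' (by decide) s h

def generate_addresses (mask : String) (address : Int) : List Int :=
  innerGen (apply_memory_mask mask address)

-- ===== PORT B =====
-- ''.join(next(bits) if c == 'X' else c for c in masked): substitute the bit stream
-- into the 'X' slots left to right (the stream is never exhausted when it has as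
-- many bits as there are 'X's, so headD '0' is exact there)
def substX : List Char → List Char → List Char
  | [], _ => []
  | c :: cs, bs => if c = 'X' then bs.headD '0' :: substX cs bs.tail else c :: substX cs bs

def generate_addresses_alt (mask : String) (address : Int) : List Int :=
  let bits36 := pyFormat036b address
  let masked := (List.zipWith (fun m b => if m = '1' ∨ m = 'X' then m else b) mask.toList bits36)
                  ++ bits36.drop mask.toList.length
  let k := masked.count 'X'
  (List.range (2 ^ k)).map (fun i => intOfBin (substX masked (padLeft k (natToBin i))))

-- ===== PRECONDITION & SPEC =====
-- A raises IndexError iff some mask position i ≥ 36 holds '1' or 'X' (the 36-char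
-- binary string is then assigned out of range); Pre_ excludes exactly those inputs.
def Pre_generate_addresses (mask : String) (address : Int) : Prop :=
  (mask.toList.drop 36).all (fun c => !(c == '1' || c == 'X')) = true

instance (mask : String) (address : Int) : Decidable (Pre_generate_addresses mask address) := by
  unfold Pre_generate_addresses; infer_instance

def pvWitness_generate_addresses : String × Int := ("1X0X", 5)

def Spec_generate_addresses (mask : String) (address : Int) (out : List Int) : Prop :=
  out = generate_addresses_alt mask address

instance (mask : String) (address : Int) (out : List Int) : Decidable (Spec_generate_addresses mask address out) := by
  unfold Spec_generate_addresses; infer_instance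

-- ===== CLAIM (what is proved, stated in full; the proofs are below) =====
def Claim_equal_generate_addresses : Prop := ∀ (mask : String) (address : Int), Dom_generate_addresses mask address → Pre_generate_addresses mask address → Spec_generate_addresses mask address (generate_addresses mask address)


-- ===== LEMMAS AND PROOFS =====

theorem substX_noX : ∀ (s bs : List Char), s.count 'X' = 0 → substX s bs = s := by
  intro s
  induction s with
  | nil => intro bs _; rfl
  | cons c cs ih =>
    intro bs h
    have hc : ¬ c = 'X' := by
      intro hc; subst hc; simp [List.count_cons] at h
    have hcs : cs.count 'X' = 0 := by
      simp [List.count_cons, hc] at h ⊢; omega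
    simp [substX, hc, ih bs hcs]

theorem substX_cons (b : Char) (hb : b ≠ 'X') :
    ∀ (s bs : List Char), substX s (b :: bs) = substX (replaceOnce b s) bs := by
  intro s
  induction s with
  | nil => intro bs; rfl
  | cons c cs ih =>
    intro bs
    by_cases hc : c = 'X'
    · subst hc; simp [substX, replaceOnce, hb]
    · simp [substX, replaceOnce, hc, ih bs]

theorem count_replaceOnce_eq (c : Char) (hc : c ≠ 'X') :
    ∀ s : List Char, 'X' ∈ s → (replaceOnce c s).count 'X' = s.count 'X' - 1 := by
  intro s
  induction s with
  | nil => simp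
  | cons x xs ih =>
    intro hs
    by_cases hx : x = 'X'
    · subst hx; simp [replaceOnce, hc]
    · have hm : 'X' ∈ xs := by
        rcases List.mem_cons.mp hs with h | h
        · exact absurd h.symm hx
        · exact h
      have h1 : 1 ≤ xs.count 'X' := List.count_pos_iff.mpr hm
      simp [replaceOnce, hx, List.count_cons, ih hm]
      try omega

-- proof-side binary representation with exactly k digits
def bitsL : Nat → Nat → List Char
  | 0, _ => []
  | (k + 1), i => bitsL k (i / 2) ++ [if i % 2 = 1 then '1' else '0']

theorem bitsL_split : ∀ (k i : Nat), i < 2 ^ (k + 1) →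
    bitsL (k + 1) i = (if i < 2 ^ k then '0' else '1') :: bitsL k (i % 2 ^ k) := by
  intro k
  induction k with
  | zero =>
    intro i hi
    interval_cases i <;> decide
  | succ k ih =>
    intro i hi
    have hdiv : i / 2 < 2 ^ (k + 1) := by
      rw [Nat.div_lt_iff_lt_mul (by norm_num)]
      calc i < 2 ^ (k + 1 + 1) := hi
        _ = 2 ^ (k + 1) * 2 := by ring
    have h1 : bitsL (k + 2) i = bitsL (k + 1) (i / 2) ++ [if i % 2 = 1 then '1' else '0'] := rfl
    rw [h1, ih (i / 2) hdiv]
    have hlt : i / 2 < 2 ^ k ↔ i < 2 ^ (k + 1) := by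
      rw [Nat.div_lt_iff_lt_mul (by norm_num)]
      constructor <;> intro h <;> [skip; skip] <;>
        · have : 2 ^ (k + 1) = 2 ^ k * 2 := by ring
          omega
    have hmd : i / 2 % 2 ^ k = i % 2 ^ (k + 1) / 2 := by
      have : i % (2 * 2 ^ k) / 2 = i / 2 % 2 ^ k := Nat.mod_mul_right_div_self (m := i) (n := 2) (k := 2 ^ k)
      have h2 : 2 ^ (k + 1) = 2 * 2 ^ k := by ring
      rw [h2]; omega
    have hm2 : i % 2 ^ (k + 1) % 2 = i % 2 := by
      apply Nat.mod_mod_of_dvd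
      exact ⟨2 ^ k, by ring⟩
    have h3 : bitsL (k + 1) (i % 2 ^ (k + 1)) =
        bitsL k (i % 2 ^ (k + 1) / 2) ++ [if i % 2 ^ (k + 1) % 2 = 1 then '1' else '0'] := rfl
    rw [h3, hm2, ← hmd]
    simp only [hlt]
    simp

theorem bitsL_zero_eq : ∀ k, bitsL k 0 = List.replicate k '0' := by
  intro k
  induction k with
  | zero => rfl
  | succ k ih =>
    show bitsL k (0 / 2) ++ [if 0 % 2 = 1 then '1' else '0'] = _
    simp [ih, List.replicate_succ' (n := k)]

theorem natToBinCore_fuel : ∀ (f f' n : Nat), n ≤ f → n ≤ f' →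
    natToBinCore f n = natToBinCore f' n := by
  intro f
  induction f with
  | zero =>
    intro f' n h _
    interval_cases n
    cases f' <;> simp [natToBinCore]
  | succ f ih =>
    intro f' n hf hf'
    match f', n with
    | f', 0 => cases f' <;> simp [natToBinCore]
    | f'' + 1, n + 1 =>
      show natToBinCore f ((n + 1) / 2) ++ _ = natToBinCore f'' ((n + 1) / 2) ++ _
      rw [ih f'' ((n + 1) / 2) (by omega) (by omega)]

-- the recurrence the Python divmod loop satisfies
theorem natToBinCore_self (n : Nat) (h : 0 < n) :
    natToBinCore n n = natToBinCore (n / 2) (n / 2) ++ [if n % 2 = 1 then '1' else '0'] := by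
  obtain ⟨m, rfl⟩ : ∃ m, n = m + 1 := ⟨n - 1, by omega⟩
  show natToBinCore m ((m + 1) / 2) ++ _ = _
  rw [natToBinCore_fuel m ((m + 1) / 2) ((m + 1) / 2) (by omega) (le_refl _)]

theorem natToBinCore_len : ∀ (k n : Nat), n < 2 ^ k → (natToBinCore n n).length ≤ k := by
  intro k
  induction k with
  | zero => intro n hn; interval_cases n; simp [natToBinCore]
  | succ k ih =>
    intro n hn
    by_cases h0 : n = 0
    · subst h0; simp [natToBinCore]
    · rw [natToBinCore_self n (by omega)]
      have : n / 2 < 2 ^ k := by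
        rw [Nat.div_lt_iff_lt_mul (by norm_num)]
        have : 2 ^ (k + 1) = 2 ^ k * 2 := by ring
        omega
      have := ih (n / 2) this
      simp [List.length_append]
      omega

theorem padLeft_natToBinCore_eq_bitsL : ∀ (k n : Nat), 0 < n → n < 2 ^ (k + 1) →
    padLeft (k + 1) (natToBinCore n n) = bitsL (k + 1) n := by
  intro k
  induction k with
  | zero =>
    intro n h0 h2
    interval_cases n
    decide
  | succ k ih =>
    intro n h0 h2
    rw [natToBinCore_self n h0]
    by_cases hq : n / 2 = 0
    · have hn1 : n = 1 := by omega
      subst hn1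
      have hb : bitsL (k + 2) 1 = bitsL (k + 1) 0 ++ ['1'] := rfl
      rw [hb, bitsL_zero_eq]
      simp [natToBinCore, padLeft, List.replicate_succ' (n := k + 1)]
    · have hdiv : n / 2 < 2 ^ (k + 1) := by
        rw [Nat.div_lt_iff_lt_mul (by norm_num)]
        have : 2 ^ (k + 2) = 2 ^ (k + 1) * 2 := by ring
        omega
      have hlen : (natToBinCore (n / 2) (n / 2)).length ≤ k + 1 := natToBinCore_len _ _ hdiv
      have hpad : padLeft (k + 2) (natToBinCore (n / 2) (n / 2) ++ [if n % 2 = 1 then '1' else '0']) =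
          padLeft (k + 1) (natToBinCore (n / 2) (n / 2)) ++ [if n % 2 = 1 then '1' else '0'] := by
        simp only [padLeft, List.length_append, List.length_cons, List.length_nil]
        rw [List.append_assoc]
        congr 2
        omega
      rw [hpad, ih (n / 2) (Nat.pos_iff_ne_zero.mpr hq) hdiv]
      rfl

theorem padbin_eq_bitsL : ∀ (k n : Nat), 1 ≤ k → n < 2 ^ k → padLeft k (natToBin n) = bitsL k n := by
  intro k n hk hn
  obtain ⟨k', rfl⟩ : ∃ k', k = k' + 1 := ⟨k - 1, by omega⟩
  by_cases h0 : n = 0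
  · subst h0
    rw [bitsL_zero_eq]
    simp [natToBin, padLeft, List.replicate_succ' (n := k')]
  · rw [natToBin, if_neg h0]
    exact padLeft_natToBinCore_eq_bitsL k' n (Nat.pos_of_ne_zero h0) hn

-- the central lemma: A's recursive wildcard expansion is B's flat enumeration
theorem inner_eq : ∀ (n : Nat) (s : List Char), s.count 'X' = n →
    innerGen s = (List.range (2 ^ n)).map
      (fun i => intOfBin (substX s (padLeft n (natToBin i)))) := by
  intro n
  induction n with
  | zero =>
    intro s hs
    have hnot : ¬ 'X' ∈ s := by
      intro h; have := List.count_pos_iff.mpr h; omega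
    rw [innerGen, dif_neg hnot]
    simp [substX_noX s _ hs]
  | succ n ih =>
    intro s hs
    have hmem : 'X' ∈ s := List.count_pos_iff.mp (by omega)
    rw [innerGen, dif_pos hmem]
    have h0 : (replaceOnce '0' s).count 'X' = n := by
      rw [count_replaceOnce_eq '0' (by decide) s hmem, hs]
      omega
    have h1 : (replaceOnce '1' s).count 'X' = n := by
      rw [count_replaceOnce_eq '1' (by decide) s hmem, hs]
      omega
    rw [ih _ h0, ih _ h1]
    have hsplit : (2 : Nat) ^ (n + 1) = 2 ^ n + 2 ^ n := by ring
    rw [hsplit, List.range_add, List.map_append, List.map_map]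
    congr 1
    · apply List.map_congr_left
      intro i hi
      have hi' : i < 2 ^ n := List.mem_range.mp hi
      have hilt : i < 2 ^ (n + 1) := by
        have h2 : (2:Nat) ^ (n + 1) = 2 ^ n + 2 ^ n := by ring
        omega
      have hpb : padLeft (n + 1) (natToBin i) = bitsL (n + 1) i :=
        padbin_eq_bitsL (n + 1) i (by omega) hilt
      rw [hpb, bitsL_split n i hilt, if_pos hi', Nat.mod_eq_of_lt hi',
        substX_cons '0' (by decide) s (bitsL n i)]
      by_cases hn0 : n = 0
      · subst hn0
        interval_cases i
        rw [substX_noX _ _ h0, substX_noX _ _ h0]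
      · rw [padbin_eq_bitsL n i (by omega) hi']
    · apply List.map_congr_left
      intro i hi
      have hi' : i < 2 ^ n := List.mem_range.mp hi
      have hilt : 2 ^ n + i < 2 ^ (n + 1) := by
        have h2 : (2:Nat) ^ (n + 1) = 2 ^ n + 2 ^ n := by ring
        omega
      have hpb : padLeft (n + 1) (natToBin (2 ^ n + i)) = bitsL (n + 1) (2 ^ n + i) :=
        padbin_eq_bitsL (n + 1) _ (by omega) hilt
      simp only [Function.comp]
      rw [hpb, bitsL_split n _ hilt, if_neg (by omega), Nat.add_mod_left, Nat.mod_eq_of_lt hi',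
        substX_cons '1' (by decide) s (bitsL n i)]
      by_cases hn0 : n = 0
      · subst hn0
        interval_cases i
        rw [substX_noX _ _ h1, substX_noX _ _ h1]
      · rw [padbin_eq_bitsL n i (by omega) hi']

-- the masked string of A's loop equals B's zipWith/drop construction
theorem foldl_set_length (f : Char → Char) :
    ∀ (is : List Nat) (mcs bv : List Char),
      ((is.foldl (fun bv i =>
        if mcs.getD i ' ' = '1' then bv.set i '1'
        else if mcs.getD i ' ' = 'X' then bv.set i 'X' else bv) bv)).length = bv.length := by
  intro is
  induction is with
  | nil => intro mcs bv; rfl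
  | cons i is ih =>
    intro mcs bv
    simp only [List.foldl_cons]
    split_ifs <;> rw [ih] <;> simp

theorem foldl_set_getD (mcs : List Char) :
    ∀ (n : Nat) (bv : List Char) (j : Nat),
      ((List.range n).foldl (fun bv i =>
        if mcs.getD i ' ' = '1' then bv.set i '1'
        else if mcs.getD i ' ' = 'X' then bv.set i 'X' else bv) bv).getD j ' ' =
      if j < n ∧ j < bv.length then
        (if mcs.getD j ' ' = '1' then '1' else if mcs.getD j ' ' = 'X' then 'X' else bv.getD j ' ')
      else bv.getD j ' ' := by
  intro n
  induction n with
  | zero => intro bv j; simp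
  | succ n ih =>
    intro bv j
    rw [List.range_succ, List.foldl_append, List.foldl_cons, List.foldl_nil]
    set P := (List.range n).foldl (fun bv i =>
        if mcs.getD i ' ' = '1' then bv.set i '1'
        else if mcs.getD i ' ' = 'X' then bv.set i 'X' else bv) bv with hP
    have hlen : P.length = bv.length := foldl_set_length id (List.range n) mcs bv
    have hget : ∀ j, P.getD j ' ' =
        if j < n ∧ j < bv.length then
          (if mcs.getD j ' ' = '1' then '1' else if mcs.getD j ' ' = 'X' then 'X' else bv.getD j ' ')
        else bv.getD j ' ' := fun j => ih bv j
    have hset : ∀ (i : Nat) (a : Char),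
        (P.set i a).getD j ' ' = if j = i ∧ j < bv.length then a else P.getD j ' ' := by
      intro i a
      by_cases hj : j = i
      · subst hj
        by_cases hl : j < bv.length
        · rw [if_pos ⟨rfl, hl⟩]
          simp [List.getD, List.getElem?_set_self (by omega : j < P.length)]
        · rw [if_neg (by tauto)]
          simp only [List.getD]
          rw [List.getElem?_set]
          simp [hlen, hl]
      · rw [if_neg (by tauto)]
        simp [List.getD, List.getElem?_set_ne (by omega : i ≠ j)]
    have step : (if mcs.getD n ' ' = '1' then P.set n '1'
        else if mcs.getD n ' ' = 'X' then P.set n 'X' else P).getD j ' ' =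
        if j = n ∧ j < bv.length then
          (if mcs.getD n ' ' = '1' then '1' else if mcs.getD n ' ' = 'X' then 'X' else P.getD j ' ')
        else P.getD j ' ' := by
      by_cases c1 : mcs.getD n ' ' = '1'
      · rw [if_pos c1, if_pos c1, hset n '1']
      · rw [if_neg c1, if_neg c1]
        by_cases cX : mcs.getD n ' ' = 'X'
        · rw [if_pos cX, if_pos cX, hset n 'X']
        · rw [if_neg cX, if_neg cX]
          split_ifs <;> rfl
    rw [step]
    by_cases hjn : j = n
    · subst hjn
      by_cases hb : j < bv.length
      · rw [if_pos (show j = j ∧ j < bv.length from ⟨rfl, hb⟩),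
          if_pos (show j < j + 1 ∧ j < bv.length from ⟨Nat.lt_succ_self j, hb⟩)]
        have hPb : P.getD j ' ' = bv.getD j ' ' := by rw [hget]; simp
        rw [hPb]
      · rw [if_neg (by tauto), if_neg (by tauto), hget]
        simp [hb]
    · rw [if_neg (by tauto), hget j]
      have heq : (j < n + 1 ∧ j < bv.length) ↔ (j < n ∧ j < bv.length) := by
        constructor <;> intro h <;> exact ⟨by omega, h.2⟩
      simp only [heq]

theorem masked_eq (mcs bv : List Char) :
    (List.range mcs.length).foldl (fun bv i =>
      if mcs.getD i ' ' = '1' then bv.set i '1'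
      else if mcs.getD i ' ' = 'X' then bv.set i 'X' else bv) bv =
    (List.zipWith (fun m b => if m = '1' ∨ m = 'X' then m else b) mcs bv) ++ bv.drop mcs.length := by
  apply List.ext_getElem
  · rw [foldl_set_length id]
    simp [List.length_zipWith, List.length_append]
    omega
  · intro j h1 h2
    have hlen : _ := foldl_set_length id (List.range mcs.length) mcs bv
    have hj : j < bv.length := by rw [hlen] at h1; exact h1
    have hL := foldl_set_getD mcs mcs.length bv j
    have hgetD : ∀ (l : List Char) (j : Nat) (h : j < l.length), l[j] = l.getD j ' ' := by
      intro l j h; simp [List.getD, List.getElem?_eq_getElem h]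
    rw [hgetD _ j h1, hL, List.getElem_append h2]
    by_cases hjm : j < mcs.length
    · have hz : j < (List.zipWith (fun m b => if m = '1' ∨ m = 'X' then m else b) mcs bv).length := by
        simp [List.length_zipWith]; omega
      rw [if_pos ⟨hjm, hj⟩, dif_pos hz, List.getElem_zipWith]
      rw [hgetD mcs j hjm, hgetD bv j hj]
      by_cases c1 : mcs.getD j ' ' = '1'
      · simp only [List.getD_eq_getElem?_getD] at c1 ⊢
        simp [c1]
      · by_cases cX : mcs.getD j ' ' = 'X' <;>
          · simp only [List.getD_eq_getElem?_getD] at c1 cX ⊢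
            simp [c1, cX]
    · have hml : mcs.length ≤ bv.length := by omega
      have hz : ¬ j < (List.zipWith (fun m b => if m = '1' ∨ m = 'X' then m else b) mcs bv).length := by
        simp [List.length_zipWith]; omega
      rw [if_neg (by tauto), dif_neg hz]
      have hzl : (List.zipWith (fun m b => if m = '1' ∨ m = 'X' then m else b) mcs bv).length
          = mcs.length := by simp [List.length_zipWith]; omega
      have : (List.drop mcs.length bv)[j - (List.zipWith (fun m b => if m = '1' ∨ m = 'X' then m else b) mcs bv).length]'(by simp [List.length_zipWith]; omega) = bv.getD j ' ' := by
        rw [List.getElem_drop]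
        have hidx : mcs.length + (j - (List.zipWith (fun m b => if m = '1' ∨ m = 'X' then m else b) mcs bv).length) = j := by
          simp [List.length_zipWith]; omega
        rw [hgetD bv _ (by omega)]
        rw [hidx]
      rw [this]

-- ===== VERDICT (by name: the statement is the Claim_ definition above) =====
theorem generate_addresses_spec : Claim_equal_generate_addresses := by
  intro mask address _ _
  unfold Spec_generate_addresses generate_addresses generate_addresses_alt apply_memory_mask
  rw [masked_eq]
  exact inner_eq _ _ rfl
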